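-- pv_equiv track=rewrite | github.com/EdwardoDavinci/Code-Home | code@home10.py | mcnugget_check
-- ===== SOURCE A (Python) =====
-- def mcnugget_check(n):
--     if n < 0:
--         return False
--     if n == 0:
--         return True
--     for i in range(n // 20 + 1):
--         for j in range(n // 9 + 1):
--             for k in range(n // 6 + 1):
--                 if i * 20 + j * 9 + k * 6 == n:
--                     return True
--     return False
-- ===== SOURCE B (Python) =====
-- def mcnugget_check(n):
--     for i in range(n // 20 + 1):
--         r = n - 20 * i
--         for j in range(r // 9 + 1):
--             if (r - 9 * j) % 6 == 0:
--                 return True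
--     return False
-- ===== Notes on version B (the rewrite author's own statement) =====
-- stated objective: faster
-- what changed: Replaces the triple nested search over (i,j,k) with a two-level loop over 20s and 9s plus a divisibility-by-6 check on the remainder, eliminating the innermost O(n) scan.
import Mathlib
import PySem

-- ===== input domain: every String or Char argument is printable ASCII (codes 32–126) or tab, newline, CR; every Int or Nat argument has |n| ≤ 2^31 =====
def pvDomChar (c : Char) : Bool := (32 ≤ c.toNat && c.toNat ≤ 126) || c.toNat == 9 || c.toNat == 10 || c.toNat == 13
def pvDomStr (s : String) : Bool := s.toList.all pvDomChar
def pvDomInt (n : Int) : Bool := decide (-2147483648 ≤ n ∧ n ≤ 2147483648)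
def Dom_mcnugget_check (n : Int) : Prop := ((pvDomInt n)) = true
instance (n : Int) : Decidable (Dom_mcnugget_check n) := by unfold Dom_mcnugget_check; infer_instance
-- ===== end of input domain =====

-- B replaces A's triple nested search by a two-level loop over the 20s and 9s with a
-- divisibility-by-6 test on the remainder (objective: faster — the innermost scan disappears).

-- ===== PORT A =====
def mcnugget_check (n : Int) : Bool :=
  if n < 0 then false
  else if n == 0 then true
  else
    (PySem.List.pyRange 0 (PySem.Int.floordiv n 20 + 1) 1).any (fun i =>
      (PySem.List.pyRange 0 (PySem.Int.floordiv n 9 + 1) 1).any (fun j =>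
        (PySem.List.pyRange 0 (PySem.Int.floordiv n 6 + 1) 1).any (fun k =>
          i * 20 + j * 9 + k * 6 == n)))

-- ===== PORT B =====
def mcnugget_check_alt (n : Int) : Bool :=
  (PySem.List.pyRange 0 (PySem.Int.floordiv n 20 + 1) 1).any (fun i =>
    let r := n - 20 * i
    (PySem.List.pyRange 0 (PySem.Int.floordiv r 9 + 1) 1).any (fun j =>
      PySem.Int.mod (r - 9 * j) 6 == 0))

-- ===== PRECONDITION & SPEC =====
def Spec_mcnugget_check (n : Int) (out : Bool) : Prop := out = mcnugget_check_alt n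
instance (n : Int) (out : Bool) : Decidable (Spec_mcnugget_check n out) := by unfold Spec_mcnugget_check; infer_instance

-- ===== CLAIM (what is proved, stated in full; the proofs are below) =====
def Claim_equal_mcnugget_check : Prop := ∀ (n : Int), Dom_mcnugget_check n → Spec_mcnugget_check n (mcnugget_check n)

-- ===== LEMMAS AND PROOFS =====

-- n is a nonnegative combination of 20, 9, 6
def pvRep (n : Int) : Prop :=
  ∃ i j k : Int, 0 ≤ i ∧ 0 ≤ j ∧ 0 ≤ k ∧ 20 * i + 9 * j + 6 * k = n

theorem mcnugget_check_iff (n : Int) : mcnugget_check n = true ↔ pvRep n := by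
  unfold mcnugget_check pvRep
  rw [PySem.Int.floordiv_eq_ediv_of_pos (a := n) (by norm_num : (0:Int) < 20),
      PySem.Int.floordiv_eq_ediv_of_pos (a := n) (by norm_num : (0:Int) < 9),
      PySem.Int.floordiv_eq_ediv_of_pos (a := n) (by norm_num : (0:Int) < 6)]
  split_ifs with hneg hzero
  · simp only [false_iff]
    rintro ⟨i, j, k, hi, hj, hk, hsum⟩; omega
  · simp only [beq_iff_eq] at hzero
    subst hzero
    simp only [true_iff]
    exact ⟨0, 0, 0, le_refl _, le_refl _, le_refl _, by ring⟩
  · simp only [beq_iff_eq] at hzero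
    simp only [List.any_eq_true, PySem.List.mem_pyRange_one, beq_iff_eq]
    constructor
    · rintro ⟨i, ⟨hi0, hi1⟩, j, ⟨hj0, hj1⟩, k, ⟨hk0, hk1⟩, hsum⟩
      exact ⟨i, j, k, hi0, hj0, hk0, by linarith⟩
    · rintro ⟨i, j, k, hi0, hj0, hk0, hsum⟩
      refine ⟨i, ⟨hi0, by omega⟩, j, ⟨hj0, by omega⟩, k, ⟨hk0, by omega⟩, by linarith⟩

theorem mcnugget_check_alt_iff (n : Int) : mcnugget_check_alt n = true ↔ pvRep n := by
  unfold mcnugget_check_alt pvRep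
  simp only [List.any_eq_true, PySem.List.mem_pyRange_one]
  constructor
  · rintro ⟨i, ⟨hi0, hi1⟩, j, ⟨hj0, hj1⟩, hmod⟩
    rw [beq_iff_eq, PySem.Int.mod_eq_zero_iff_dvd] at hmod
    obtain ⟨k, hk⟩ := hmod
    rw [PySem.Int.floordiv_eq_ediv_of_pos (by norm_num : (0:Int) < 20)] at hi1
    rw [PySem.Int.floordiv_eq_ediv_of_pos (by norm_num : (0:Int) < 9)] at hj1
    exact ⟨i, j, k, hi0, hj0, by omega, by omega⟩
  · rintro ⟨i, j, k, hi0, hj0, hk0, hsum⟩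
    refine ⟨i, ⟨hi0, ?_⟩, j, ⟨hj0, ?_⟩, ?_⟩
    · rw [PySem.Int.floordiv_eq_ediv_of_pos (by norm_num : (0:Int) < 20)]; omega
    · rw [PySem.Int.floordiv_eq_ediv_of_pos (by norm_num : (0:Int) < 9)]; omega
    · rw [beq_iff_eq, PySem.Int.mod_eq_zero_iff_dvd]
      exact ⟨k, by omega⟩

-- ===== VERDICT (by name: the statement is the Claim_ definition above) =====
theorem mcnugget_check_spec : Claim_equal_mcnugget_check := by
  intro n _
  unfold Spec_mcnugget_check
  have hA := mcnugget_check_iff n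
  have hB := mcnugget_check_alt_iff n
  cases hb : mcnugget_check_alt n <;> cases ha : mcnugget_check n <;> simp_all
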